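-- pv_equiv track=rewrite | github.com/fbellidopazos/covidSIRAnalysis | processingModule.py | indexedNumbers
-- ===== SOURCE A (Python) =====
-- def indexedNumbers(row):
--     fechaField=-1
--     observedField=-1
--     infectedField=-1
--     countryField = -1
--     for i in range(0,len(row)):
--         if(row[i]=="date"):
--             fechaField = i
--         elif(row[i]=="confirmed_infections_data_type"):
--             observedField = i
--         elif(row[i]=="confirmed_infections"):
--             infectedField = i
--         elif(row[i]=="location_name"):
--             countryField=i
--     return fechaField,countryField,observedField,infectedField
-- ===== SOURCE B (Python) =====
-- def indexedNumbers(row):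
--     def lastIndex(name):
--         for i in range(len(row) - 1, -1, -1):
--             if row[i] == name:
--                 return i
--         return -1
--     return (lastIndex("date"),
--             lastIndex("location_name"),
--             lastIndex("confirmed_infections_data_type"),
--             lastIndex("confirmed_infections"))
-- ===== Notes on version B (the rewrite author's own statement) =====
-- stated objective: alternative
-- what changed: Replaces A's single forward pass with four branched accumulators by four independent backward scans, each returning early at the first (i.e. last-in-row) occurrence of its header name, with -1 when absent.
import Mathlib
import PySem

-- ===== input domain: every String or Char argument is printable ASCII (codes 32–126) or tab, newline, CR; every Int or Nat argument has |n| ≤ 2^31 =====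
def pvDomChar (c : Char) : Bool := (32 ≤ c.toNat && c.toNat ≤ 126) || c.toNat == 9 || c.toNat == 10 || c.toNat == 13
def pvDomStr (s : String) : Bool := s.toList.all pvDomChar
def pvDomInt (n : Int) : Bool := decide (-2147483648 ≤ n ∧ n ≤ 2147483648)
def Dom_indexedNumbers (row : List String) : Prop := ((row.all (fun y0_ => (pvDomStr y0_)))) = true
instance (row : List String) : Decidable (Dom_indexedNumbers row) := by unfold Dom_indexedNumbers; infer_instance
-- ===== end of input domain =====

-- B replaces A's single forward pass with four branched accumulators by four
-- independent backward scans with early exit (alternative decomposition).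


-- ===== PORT A =====
-- state = (fechaField, observedField, infectedField, countryField), in A's declaration order
def indexedNumbersStep (s : Int × Int × Int × Int) (i : Int) (x : String) : Int × Int × Int × Int :=
  if x == "date" then (i, s.2.1, s.2.2.1, s.2.2.2)
  else if x == "confirmed_infections_data_type" then (s.1, i, s.2.2.1, s.2.2.2)
  else if x == "confirmed_infections" then (s.1, s.2.1, i, s.2.2.2)
  else if x == "location_name" then (s.1, s.2.1, s.2.2.1, i)
  else s

def indexedNumbers (row : List String) : Int × Int × Int × Int :=
  let s := (PySem.List.pyRange 0 (PySem.List.len row) 1).foldl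
    (fun s i => indexedNumbersStep s i (PySem.List.pyGetD row i "")) (-1, -1, -1, -1)
  (s.1, s.2.2.2, s.2.1, s.2.2.1)

-- ===== PORT B =====
-- the inner 'for i in range(len(row)-1,-1,-1): if row[i]==name: return i' loop
def lastIndexLoop (row : List String) (name : String) : List Int → Int
  | [] => -1
  | i :: rest =>
      if PySem.List.pyGetD row i "" == name then i else lastIndexLoop row name rest

def indexedNumbers_alt (row : List String) : Int × Int × Int × Int :=
  let lastIndex := fun name =>
    lastIndexLoop row name (PySem.List.pyRange (PySem.List.len row - 1) (-1) (-1))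
  (lastIndex "date", lastIndex "location_name",
   lastIndex "confirmed_infections_data_type", lastIndex "confirmed_infections")

-- ===== PRECONDITION & SPEC =====
def Spec_indexedNumbers (row : List String) (out : Int × Int × Int × Int) : Prop := out = indexedNumbers_alt row
instance (row : List String) (out : Int × Int × Int × Int) : Decidable (Spec_indexedNumbers row out) := by unfold Spec_indexedNumbers; infer_instance

-- ===== CLAIM =====
def Claim_equal_indexedNumbers : Prop := ∀ (row : List String), Dom_indexedNumbers row → Spec_indexedNumbers row (indexedNumbers row)

-- ===== LEMMAS AND PROOFS =====
-- last-wins forward fold over l = first match over l.reverse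
theorem foldl_ite_eq_reverse_scan (row : List String) (name : String)
    (l : List Int) (d : Int) :
    l.foldl (fun a i => if PySem.List.pyGetD row i "" == name then i else a) d
      = (match l.reverse.find? (fun i => PySem.List.pyGetD row i "" == name) with
         | some i => i
         | none => d) := by
  induction l generalizing d with
  | nil => rfl
  | cons i l ih =>
    simp only [List.foldl_cons, List.reverse_cons, List.find?_append, ih, List.find?]
    cases h2 : (PySem.List.pyGetD row i "" == name) <;>
      cases h : l.reverse.find? (fun i => PySem.List.pyGetD row i "" == name) <;>
      simp [h, h2]

-- lastIndexLoop is the first-match scan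
theorem lastIndexLoop_eq_find (row : List String) (name : String) (l : List Int) :
    lastIndexLoop row name l
      = (match l.find? (fun i => PySem.List.pyGetD row i "" == name) with
         | some i => i
         | none => -1) := by
  induction l with
  | nil => rfl
  | cons i l ih =>
    simp only [lastIndexLoop, List.find?]
    by_cases h : PySem.List.pyGetD row i "" == name <;> simp [h, ih]

-- A's step, written componentwise (the four header strings are pairwise distinct)
theorem step_componentwise (s : Int × Int × Int × Int) (i : Int) (x : String) :
    indexedNumbersStep s i x =
      (if x == "date" then i else s.1,
       if x == "confirmed_infections_data_type" then i else s.2.1,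
       if x == "confirmed_infections" then i else s.2.2.1,
       if x == "location_name" then i else s.2.2.2) := by
  unfold indexedNumbersStep
  simp only [beq_iff_eq]
  split_ifs <;> subst_vars <;> simp_all

-- A's fold, componentwise
theorem foldA_componentwise (row : List String) (l : List Int) (s : Int × Int × Int × Int) :
    l.foldl (fun s i => indexedNumbersStep s i (PySem.List.pyGetD row i "")) s
      = (l.foldl (fun a i => if PySem.List.pyGetD row i "" == "date" then i else a) s.1,
         l.foldl (fun a i => if PySem.List.pyGetD row i "" == "confirmed_infections_data_type" then i else a) s.2.1,
         l.foldl (fun a i => if PySem.List.pyGetD row i "" == "confirmed_infections" then i else a) s.2.2.1,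
         l.foldl (fun a i => if PySem.List.pyGetD row i "" == "location_name" then i else a) s.2.2.2) := by
  induction l generalizing s with
  | nil => rfl
  | cons i l ih =>
    rw [List.foldl_cons, ih, step_componentwise]
    simp [List.foldl_cons]

-- ===== VERDICT =====
theorem indexedNumbers_spec : Claim_equal_indexedNumbers := by
  unfold Claim_equal_indexedNumbers Spec_indexedNumbers
  intro row _
  show indexedNumbers row = indexedNumbers_alt row
  have hrev : PySem.List.pyRange (PySem.List.len row - 1) (-1) (-1)
      = (PySem.List.pyRange 0 (PySem.List.len row) 1).reverse := by
    rw [PySem.List.pyRange_neg_one_eq_reverse]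
    norm_num
  simp only [indexedNumbers, indexedNumbers_alt, hrev,
    foldA_componentwise, foldl_ite_eq_reverse_scan, lastIndexLoop_eq_find]
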